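-- pv_equiv track=rewrite | github.com/Ayub-Hanif/Uninformed-Search | homework1_mhanifsaleh.py | solve_identical_disks
-- ===== SOURCE A (Python) =====
-- import collections
--
-- def solve_identical_disks(length, n):
--
--     first = tuple(range(n))
--     finished = tuple(range(length-n, length))
--
--     #then I want to make sure we have the BFS
--     queue = collections.deque()
--     queue.append((first, []))
--     visited = {first}
--
--     while queue:
--         current, moves = queue.popleft()
--         if current == finished:
--             return moves
--         #I made this to check for membership.
--         taken = set(current)
--
--         #name the jumps to make it easier for coding logic
--         jump_one_left = -1
--         jump_one_right = 1
--         jump_two_left = -2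
--         jump_two_right = 2
--
--         #lets check for each disk and see if moving it can work.
--         for index in range(len(current)):
--             pos = current[index]
--             #checking for moving it to the left or right.
--             for i in (jump_two_right, jump_two_left, jump_one_right, jump_one_left):
--                 cell = pos + i
--                 #checking for conditions of the cell.
--                 if cell in taken:
--                     continue
--                 if not (0 <= cell < length):
--                     continue
--                 if abs(i) == jump_two_right:
--                     middle = (pos + cell) // 2
--                     if middle not in taken:
--                         continue
--
--                 #it is a valid move so we can add it to the queue.
--                 new_current = list(current)
--                 new_current[index] = cell
--                 #sort the new current for right order.
--                 new_current.sort()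
--                 new_current = tuple(new_current)
--                 #checking for visited cells.
--                 if new_current in visited:
--                     continue
--                 visited.add(new_current)
--                 #add the new current to the queue.
--                 queue.append((new_current, moves + [(pos, cell)]))
--     #return none since we can't find a solution.
--     return None
-- ===== SOURCE B (Python) =====
-- import collections
--
-- def solve_identical_disks(length, n):
--     # BFS over bare states with a parent map; the move sequence is reconstructed
--     # backwards from the parent map at the goal instead of being copied into
--     # every queue entry.
--     first = tuple(range(n))
--     finished = tuple(range(length - n, length))
--
--     parent = {}
--     visited = {first}
--     queue = collections.deque([first])
--
--     while queue:
--         cur = queue.popleft()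
--         if cur == finished:
--             # walk the parent chain back to the start, then reverse
--             moves = []
--             node = cur
--             while node != first:
--                 node, mv = parent[node]
--                 moves.append(mv)
--             moves.reverse()
--             return moves
--         occupied = set(cur)
--         # all legal moves from cur, in the same (+2, -2, +1, -1) order per disk
--         candidates = [
--             (tuple(sorted(cur[:idx] + (pos + step,) + cur[idx + 1:])), (pos, pos + step))
--             for idx, pos in enumerate(cur)
--             for step in (2, -2, 1, -1)
--             if pos + step not in occupied
--             and 0 <= pos + step < length
--             and (abs(step) != 2 or (pos + (pos + step)) // 2 in occupied)
--         ]
--         for nxt, mv in candidates: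
--             if nxt not in visited:
--                 visited.add(nxt)
--                 parent[nxt] = (cur, mv)
--                 queue.append(nxt)
--     return None
-- ===== Notes on version B (the rewrite author's own statement) =====
-- stated objective: simpler
-- what changed: B's BFS enqueues bare states and records a parent map (state -> (predecessor, move)) at first discovery, reconstructing the move list backwards only at the goal, instead of A's copying of the whole growing move list into every queue entry; the per-state move generation becomes one comprehension over a filtered step list instead of nested guarded loops.
import Mathlib
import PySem

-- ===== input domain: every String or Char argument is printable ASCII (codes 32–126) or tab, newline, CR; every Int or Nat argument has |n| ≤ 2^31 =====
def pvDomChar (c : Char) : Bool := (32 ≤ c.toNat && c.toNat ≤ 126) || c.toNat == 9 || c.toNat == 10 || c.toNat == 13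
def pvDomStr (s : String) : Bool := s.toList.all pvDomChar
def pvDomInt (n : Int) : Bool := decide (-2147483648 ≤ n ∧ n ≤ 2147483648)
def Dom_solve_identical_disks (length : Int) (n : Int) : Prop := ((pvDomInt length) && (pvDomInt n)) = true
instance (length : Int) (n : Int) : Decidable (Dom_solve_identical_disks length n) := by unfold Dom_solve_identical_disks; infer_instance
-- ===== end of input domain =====

-- B replaces A's moves-list-in-every-queue-entry BFS by a bare-state BFS with a
-- parent map and a backward path reconstruction at the goal (simpler queue entries,
-- no repeated move-list copying); same traversal order, same returned move sequence.
-- Python's set/dict are used by BOTH programs only for membership/lookup (their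
-- iteration order is never consumed), so they are ported as Std.TreeSet/Std.TreeMap —
-- exact as finite sets / key-value maps — so the ports evaluate in reasonable time.


-- ===== PORT A =====
-- A: BFS whose queue entries carry the whole move list; 'for index in range(len(current))'
-- with 'current[index]' is ported as a fold over List.zipIdx, which carries exactly the same
-- (element, index) pairs (PySem.List.enumerate is not tail-recursive and overflows the
-- interpreter stack on long inputs); list assignment + .sort() is List.set + PySem.List.sorted.

def diskJumps : List Int := [2, -2, 1, -1]

def expandA (length : Int) (current : List Int) (moves : List (Int × Int))
    (st : List (List Int × List (Int × Int)) × Std.TreeSet (List Int) compare) :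
    List (List Int × List (Int × Int)) × Std.TreeSet (List Int) compare :=
  let taken := Std.TreeSet.ofList current compare
  current.zipIdx.foldl (fun st ip =>
    diskJumps.foldl (fun st i =>
      let pos := ip.1
      let cell := pos + i
      if taken.contains cell then st
      else if ¬ (0 ≤ cell ∧ cell < length) then st
      else if |i| = 2 ∧ taken.contains (PySem.Int.floordiv (pos + cell) 2) = false then st
      else
        let newCur := PySem.List.sorted (current.set ip.2 cell) (fun x => x) false
        if st.2.contains newCur then st
        else (st.1 ++ [(newCur, moves ++ [(pos, cell)])], st.2.insert newCur)) st) st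

-- while queue: pop, goal test, expand.  Fuel is a totality guard only: each loop
-- iteration pops one entry and every enqueued state is a fresh member of 'visited',
-- a set of ≤ 2^max(length,n) states, so 2^max(length,n)+1 iterations always suffice.
def loopA (length : Int) (finished : List Int) :
    Nat → List (List Int × List (Int × Int)) → Std.TreeSet (List Int) compare →
      Option (List (Int × Int))
  | 0, _, _ => none
  | _ + 1, [], _ => none
  | fuel + 1, (current, moves) :: rest, visited =>
    if current = finished then some moves
    else
      let st := expandA length current moves (rest, visited)
      loopA length finished fuel st.1 st.2

def solve_identical_disks (length : Int) (n : Int) : Option (List (Int × Int)) :=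
  let first := PySem.List.pyRange 0 n 1
  let finished := PySem.List.pyRange (length - n) length 1
  loopA length finished (2 ^ (max length n).toNat + 1) [(first, [])]
    (Std.TreeSet.ofList [first] compare)

-- ===== PORT B =====
-- B: BFS over bare states; parent[nxt] = (cur, move) is recorded at first discovery and
-- the move list is reconstructed backwards at the goal.  The candidate comprehension is a
-- flatMap over zipIdx (Python's enumerate) with a filtered, mapped step list; tuple slicing
-- via PySem.List.slice.

def candB (length : Int) (cur : List Int) : List (List Int × (Int × Int)) :=
  let occupied := Std.TreeSet.ofList cur compare
  cur.zipIdx.flatMap (fun ip =>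
    (([2, -2, 1, -1] : List Int).filter (fun step =>
        !(occupied.contains (ip.1 + step)) &&
        (decide (0 ≤ ip.1 + step) && decide (ip.1 + step < length)) &&
        (!(|step| == 2) ||
          occupied.contains (PySem.Int.floordiv (ip.1 + (ip.1 + step)) 2)))).map
      (fun step =>
        (PySem.List.sorted
            (PySem.List.slice cur none (some (ip.2 : Int)) ++ [ip.1 + step] ++
             PySem.List.slice cur (some ((ip.2 : Int) + 1)) none) (fun x => x) false,
         (ip.1, ip.1 + step))))

-- 'while node != first: node, mv = parent[node]; moves.append(mv)'.  Fuel is a totality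
-- guard only: the chain from any recorded state is shorter than parent.size + 1.
def walkB (parent : Std.TreeMap (List Int) (List Int × (Int × Int)) compare) (first : List Int) :
    Nat → List Int → List (Int × Int) → Option (List (Int × Int))
  | 0, _, _ => none
  | fuel + 1, node, acc =>
    if node = first then some acc
    else
      match parent[node]? with
      | some pm => walkB parent first fuel pm.1 (acc ++ [pm.2])
      | none => none

def loopB (length : Int) (first finished : List Int) :
    Nat → List (List Int) → Std.TreeSet (List Int) compare →
      Std.TreeMap (List Int) (List Int × (Int × Int)) compare → Option (List (Int × Int))
  | 0, _, _, _ => none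
  | _ + 1, [], _, _ => none
  | fuel + 1, cur :: rest, visited, parent =>
    if cur = finished then
      (walkB parent first (parent.size + 1) cur []).map List.reverse
    else
      let st := (candB length cur).foldl (fun st c =>
        if st.2.1.contains c.1 then st
        else (st.1 ++ [c.1], st.2.1.insert c.1, st.2.2.insert c.1 (cur, c.2))) (rest, visited, parent)
      loopB length first finished fuel st.1 st.2.1 st.2.2

def solve_identical_disks_alt (length : Int) (n : Int) : Option (List (Int × Int)) :=
  let first := PySem.List.pyRange 0 n 1
  let finished := PySem.List.pyRange (length - n) length 1
  loopB length first finished (2 ^ (max length n).toNat + 1) [first]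
    (Std.TreeSet.ofList [first] compare) Std.TreeMap.empty

-- ===== PRECONDITION & SPEC =====
def Spec_solve_identical_disks (length : Int) (n : Int) (out : Option (List (Int × Int))) : Prop :=
  out = solve_identical_disks_alt length n
instance (length : Int) (n : Int) (out : Option (List (Int × Int))) :
    Decidable (Spec_solve_identical_disks length n out) := by
  unfold Spec_solve_identical_disks; infer_instance

-- ===== CLAIM (what is proved, stated in full; the proofs are below) =====
def Claim_equal_solve_identical_disks : Prop :=
  ∀ (length : Int) (n : Int), Dom_solve_identical_disks length n →
    Spec_solve_identical_disks length n (solve_identical_disks length n)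

-- ===== LEMMAS AND PROOFS =====

-- the parent chain of s spells the move list m (backwards), stopping at 'first'
inductive TraceP (parent : Std.TreeMap (List Int) (List Int × (Int × Int)) compare)
    (first : List Int) : List Int → List (Int × Int) → Prop
  | nil : TraceP parent first first []
  | step {s p mv m} : s ≠ first → parent[s]? = some (p, mv) →
      TraceP parent first p m → TraceP parent first s (m ++ [mv])

theorem walk_of_trace {parent : Std.TreeMap (List Int) (List Int × (Int × Int)) compare}
    {first s : List Int} {m : List (Int × Int)} (h : TraceP parent first s m) :
    ∀ (fuel : Nat) (acc : List (Int × Int)), m.length < fuel →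
      walkB parent first fuel s acc = some (acc ++ m.reverse) := by
  induction h with
  | nil =>
    intro fuel acc hf
    cases fuel with
    | zero => omega
    | succ f => simp [walkB]
  | step hne hget _ ih =>
    intro fuel acc hf
    cases fuel with
    | zero => simp at hf
    | succ f =>
      simp only [walkB, if_neg hne, hget]
      rw [ih f (acc ++ [_]) (by simp at hf ⊢; omega)]
      simp

theorem trace_insert {parent : Std.TreeMap (List Int) (List Int × (Int × Int)) compare}
    {first k s : List Int} {v : List Int × (Int × Int)} {m : List (Int × Int)}
    (hk : parent[k]? = none) (h : TraceP parent first s m) :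
    TraceP (parent.insert k v) first s m := by
  induction h with
  | nil => exact TraceP.nil
  | step hne hget _ ih =>
    refine TraceP.step hne ?_ ih
    rw [Std.TreeMap.getElem?_insert]
    rw [if_neg]
    · exact hget
    · intro hcmp
      rw [Std.LawfulEqCmp.compare_eq_iff_eq] at hcmp
      rw [← hcmp, hk] at hget
      exact absurd hget (by simp)

-- per-disk inner loop: A's guarded step fold equals the fold of B's filtered, mapped steps
theorem one_step_eq (length : Int) (cur : List Int) (m : List (Int × Int)) (k : Nat)
    (hk : k < cur.length) (i : Int)
    (acc : List (List Int × List (Int × Int)) × Std.TreeSet (List Int) compare) :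
    (if (Std.TreeSet.ofList cur compare).contains (cur[k] + i) then acc
     else if ¬ (0 ≤ cur[k] + i ∧ cur[k] + i < length) then acc
     else if |i| = 2 ∧ (Std.TreeSet.ofList cur compare).contains
         (PySem.Int.floordiv (cur[k] + (cur[k] + i)) 2) = false then acc
     else
       if acc.2.contains
           (PySem.List.sorted (cur.set k (cur[k] + i)) (fun x => x) false) then acc
       else (acc.1 ++ [(PySem.List.sorted (cur.set k (cur[k] + i)) (fun x => x) false,
              m ++ [(cur[k], cur[k] + i)])],
             acc.2.insert
               (PySem.List.sorted (cur.set k (cur[k] + i)) (fun x => x) false))) =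
    (if (!((Std.TreeSet.ofList cur compare).contains (cur[k] + i)) &&
          (decide (0 ≤ cur[k] + i) && decide (cur[k] + i < length)) &&
          (!(|i| == 2) || (Std.TreeSet.ofList cur compare).contains
            (PySem.Int.floordiv (cur[k] + (cur[k] + i)) 2))) = true then
       (if acc.2.contains
            (PySem.List.sorted (PySem.List.slice cur none (some (k : Int)) ++ [cur[k] + i] ++
              PySem.List.slice cur (some ((k : Int) + 1)) none) (fun x => x) false) then acc
        else (acc.1 ++ [(PySem.List.sorted (PySem.List.slice cur none (some (k : Int)) ++ [cur[k] + i] ++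
                PySem.List.slice cur (some ((k : Int) + 1)) none) (fun x => x) false,
               m ++ [(cur[k], cur[k] + i)])],
              acc.2.insert
                (PySem.List.sorted (PySem.List.slice cur none (some (k : Int)) ++ [cur[k] + i] ++
                  PySem.List.slice cur (some ((k : Int) + 1)) none) (fun x => x) false)))
     else acc) := by
  have hset : cur.set k (cur[k] + i) =
      PySem.List.slice cur none (some (k : Int)) ++ [cur[k] + i] ++
        PySem.List.slice cur (some ((k : Int) + 1)) none := by
    rw [PySem.List.slice_to_natCast, show ((k : Int) + 1) = ((k + 1 : Nat) : Int) by push_cast; ring,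
      PySem.List.slice_from_natCast]
    rw [List.set_eq_take_cons_drop _ hk]
    simp
  rw [hset]
  by_cases h1 : (Std.TreeSet.ofList cur compare).contains (cur[k] + i) = true <;>
    by_cases h2a : (0 : Int) ≤ cur[k] + i <;>
      by_cases h2b : cur[k] + i < length <;>
        by_cases h3 : |i| = (2 : Int) <;>
          by_cases h4 : (Std.TreeSet.ofList cur compare).contains
              (PySem.Int.floordiv (cur[k] + (cur[k] + i)) 2) = true <;>
            simp [h1, h2a, h2b, h3, h4]

theorem steps_eq (length : Int) (cur : List Int) (m : List (Int × Int)) (k : Nat)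
    (hk : k < cur.length) :
    ∀ (steps : List Int) (acc : List (List Int × List (Int × Int)) × Std.TreeSet (List Int) compare),
      steps.foldl (fun st i =>
        if (Std.TreeSet.ofList cur compare).contains (cur[k] + i) then st
        else if ¬ (0 ≤ cur[k] + i ∧ cur[k] + i < length) then st
        else if |i| = 2 ∧ (Std.TreeSet.ofList cur compare).contains
            (PySem.Int.floordiv (cur[k] + (cur[k] + i)) 2) = false then st
        else
          if st.2.contains
              (PySem.List.sorted (cur.set k (cur[k] + i)) (fun x => x) false) then st
          else (st.1 ++ [(PySem.List.sorted (cur.set k (cur[k] + i)) (fun x => x) false,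
                 m ++ [(cur[k], cur[k] + i)])],
                st.2.insert
                  (PySem.List.sorted (cur.set k (cur[k] + i)) (fun x => x) false))) acc =
      ((steps.filter (fun step =>
          !((Std.TreeSet.ofList cur compare).contains (cur[k] + step)) &&
          (decide (0 ≤ cur[k] + step) && decide (cur[k] + step < length)) &&
          (!(|step| == 2) || (Std.TreeSet.ofList cur compare).contains
            (PySem.Int.floordiv (cur[k] + (cur[k] + step)) 2)))).map
        (fun step =>
          (PySem.List.sorted (PySem.List.slice cur none (some (k : Int)) ++ [cur[k] + step] ++
              PySem.List.slice cur (some ((k : Int) + 1)) none) (fun x => x) false,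
           (cur[k], cur[k] + step)))).foldl
        (fun st c => if st.2.contains c.1 then st
          else (st.1 ++ [(c.1, m ++ [c.2])], st.2.insert c.1)) acc := by
  intro steps
  induction steps with
  | nil => intro acc; rfl
  | cons i t iht =>
    intro acc
    rw [List.foldl_cons, List.filter_cons, one_step_eq length cur m k hk i acc]
    by_cases hp : (!((Std.TreeSet.ofList cur compare).contains (cur[k] + i)) &&
          (decide (0 ≤ cur[k] + i) && decide (cur[k] + i < length)) &&
          (!(|i| == 2) || (Std.TreeSet.ofList cur compare).contains
            (PySem.Int.floordiv (cur[k] + (cur[k] + i)) 2))) = true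
    · rw [if_pos hp, if_pos hp, List.map_cons, List.foldl_cons]
      exact iht _
    · rw [if_neg hp, if_neg hp]
      exact iht _

-- A's nested-loop expansion of one state equals a fold of B's candidate list
theorem expandA_eq (length : Int) (cur : List Int) (m : List (Int × Int))
    (st : List (List Int × List (Int × Int)) × Std.TreeSet (List Int) compare) :
    expandA length cur m st =
      (candB length cur).foldl (fun st c =>
        if st.2.contains c.1 then st
        else (st.1 ++ [(c.1, m ++ [c.2])], st.2.insert c.1)) st := by
  unfold expandA candB
  rw [List.foldl_flatMap]
  apply PySem.List.foldl_congr_mem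
  intro acc ip hip
  rw [List.mem_zipIdx_iff_getElem?] at hip
  have hk : ip.2 < cur.length := (List.getElem?_eq_some_iff.1 hip).1
  have hv : ip.1 = cur[ip.2] := by
    have := (List.getElem?_eq_some_iff.1 hip).2
    exact this.symm
  obtain ⟨a, k⟩ := ip
  simp only at hk hv
  subst hv
  exact steps_eq length cur m k hk diskJumps acc

-- the coupled BFS invariant is preserved along the per-state candidate fold
theorem fold_inv (_length : Int) (first cur : List Int) (m : List (Int × Int)) :
    ∀ (cands : List (List Int × (Int × Int)))
      (qA : List (List Int × List (Int × Int))) (qB : List (List Int))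
      (v : Std.TreeSet (List Int) compare)
      (parent : Std.TreeMap (List Int) (List Int × (Int × Int)) compare),
      qA.map Prod.fst = qB →
      v.contains first = true →
      (∀ k val, parent[k]? = some val → v.contains k = true) →
      TraceP parent first cur m →
      m.length ≤ parent.size →
      (∀ p ∈ qA, TraceP parent first p.1 p.2 ∧ p.2.length ≤ parent.size) →
      (cands.foldl (fun st c =>
          if st.2.contains c.1 then st
          else (st.1 ++ [(c.1, m ++ [c.2])], st.2.insert c.1)) (qA, v)).1.map Prod.fst =
        (cands.foldl (fun st c =>
          if st.2.1.contains c.1 then st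
          else (st.1 ++ [c.1], st.2.1.insert c.1, st.2.2.insert c.1 (cur, c.2))) (qB, v, parent)).1 ∧
      (cands.foldl (fun st c =>
          if st.2.contains c.1 then st
          else (st.1 ++ [(c.1, m ++ [c.2])], st.2.insert c.1)) (qA, v)).2 =
        (cands.foldl (fun st c =>
          if st.2.1.contains c.1 then st
          else (st.1 ++ [c.1], st.2.1.insert c.1, st.2.2.insert c.1 (cur, c.2))) (qB, v, parent)).2.1 ∧
      ((cands.foldl (fun st c =>
          if st.2.contains c.1 then st
          else (st.1 ++ [(c.1, m ++ [c.2])], st.2.insert c.1)) (qA, v)).2.contains first = true) ∧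
      (∀ k val, ((cands.foldl (fun st c =>
          if st.2.1.contains c.1 then st
          else (st.1 ++ [c.1], st.2.1.insert c.1, st.2.2.insert c.1 (cur, c.2))) (qB, v, parent)).2.2)[k]? = some val →
          (cands.foldl (fun st c =>
          if st.2.contains c.1 then st
          else (st.1 ++ [(c.1, m ++ [c.2])], st.2.insert c.1)) (qA, v)).2.contains k = true) ∧
      (∀ p ∈ (cands.foldl (fun st c =>
          if st.2.contains c.1 then st
          else (st.1 ++ [(c.1, m ++ [c.2])], st.2.insert c.1)) (qA, v)).1,
          TraceP ((cands.foldl (fun st c =>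
            if st.2.1.contains c.1 then st
            else (st.1 ++ [c.1], st.2.1.insert c.1, st.2.2.insert c.1 (cur, c.2))) (qB, v, parent)).2.2) first p.1 p.2 ∧
          p.2.length ≤ ((cands.foldl (fun st c =>
            if st.2.1.contains c.1 then st
            else (st.1 ++ [c.1], st.2.1.insert c.1, st.2.2.insert c.1 (cur, c.2))) (qB, v, parent)).2.2).size) := by
  intro cands
  induction cands with
  | nil =>
    intro qA qB v parent hq hf hk htc hlen ht
    exact ⟨hq, rfl, hf, fun k val h => hk k val h, ht⟩
  | cons c t ih =>
    intro qA qB v parent hq hf hk htc hlen ht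
    obtain ⟨nxt, mv⟩ := c
    simp only [List.foldl_cons]
    by_cases hc : v.contains nxt = true
    · simp only [hc, if_true]
      exact ih qA qB v parent hq hf hk htc hlen ht
    · simp only [hc, if_false, Bool.false_eq_true]
      have hgetnone : parent[nxt]? = none := by
        cases h : parent[nxt]? with
        | none => rfl
        | some val => exact absurd (hk nxt val h) hc
      have hnefirst : nxt ≠ first := fun h => hc (h ▸ hf)
      have hcontains : parent.contains nxt = false := by
        rw [Std.TreeMap.contains_eq_isSome_getElem?, hgetnone]
        rfl
      have hsize : (parent.insert nxt (cur, mv)).size = parent.size + 1 := by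
        rw [Std.TreeMap.size_insert, hcontains]; simp
      refine ih (qA ++ [(nxt, m ++ [mv])]) (qB ++ [nxt]) (v.insert nxt)
        (parent.insert nxt (cur, mv)) ?_ ?_ ?_ ?_ ?_ ?_
      · simp [hq]
      · simp [Std.TreeSet.contains_insert, hf]
      · intro k val h
        rw [Std.TreeMap.getElem?_insert] at h
        by_cases hcmp : compare nxt k = Ordering.eq
        · rw [Std.LawfulEqCmp.compare_eq_iff_eq] at hcmp
          subst hcmp
          simp [Std.TreeSet.contains_insert]
        · rw [if_neg hcmp] at h
          simp [Std.TreeSet.contains_insert, hk k val h]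
      · exact trace_insert hgetnone htc
      · omega
      · intro p hp
        rcases List.mem_append.1 hp with hp | hp
        · obtain ⟨h1, h2⟩ := ht p hp
          exact ⟨trace_insert hgetnone h1, by omega⟩
        · simp at hp
          subst hp
          refine ⟨TraceP.step hnefirst (by simp)
            (trace_insert hgetnone htc), ?_⟩
          simp [hsize]
          omega

theorem loop_eq (length : Int) (first finished : List Int) :
    ∀ (fuel : Nat) (qA : List (List Int × List (Int × Int))) (qB : List (List Int))
      (v : Std.TreeSet (List Int) compare)
      (parent : Std.TreeMap (List Int) (List Int × (Int × Int)) compare),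
      qA.map Prod.fst = qB →
      v.contains first = true →
      (∀ k val, parent[k]? = some val → v.contains k = true) →
      (∀ p ∈ qA, TraceP parent first p.1 p.2 ∧ p.2.length ≤ parent.size) →
      loopA length finished fuel qA v = loopB length first finished fuel qB v parent := by
  intro fuel
  induction fuel with
  | zero => intro qA qB v parent hq hf hk ht; rfl
  | succ f ih =>
    intro qA qB v parent hq hf hk ht
    cases qA with
    | nil =>
      have : qB = [] := by simpa using hq.symm
      subst this; rfl
    | cons head rest =>
      obtain ⟨cur, m⟩ := head
      cases qB with
      | nil => simp at hq
      | cons b bs =>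
        have hb : cur = b ∧ rest.map Prod.fst = bs := by simpa using hq
        obtain ⟨rfl, hrest⟩ := hb
        obtain ⟨htc, hlen⟩ := ht (cur, m) (by simp)
        by_cases hfin : cur = finished
        · simp only [loopA, loopB, if_pos hfin]
          rw [walk_of_trace htc (parent.size + 1) [] (by omega)]
          simp
        · simp only [loopA, loopB, if_neg hfin]
          rw [expandA_eq]
          obtain ⟨h1, h2, h3, h4, h5⟩ :=
            fold_inv length first cur m (candB length cur) rest bs v parent hrest hf hk htc hlen
              (fun p hp => ht p (by simp [hp]))
          rw [h2] at h3 h4 ⊢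
          exact ih _ _ _ _ h1 h3 h4 h5

-- ===== VERDICT (by name: the statement is the Claim_ definition above) =====
theorem solve_identical_disks_spec : Claim_equal_solve_identical_disks := by
  intro length n _
  unfold Spec_solve_identical_disks solve_identical_disks solve_identical_disks_alt
  apply loop_eq
  · simp
  · simp
  · intro k val h
    simp at h
  · intro p hp
    simp at hp
    subst hp
    exact ⟨TraceP.nil, by simp⟩
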